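-- pv_equiv track=rewrite | github.com/kth-competitive-programming/kactl | content/tex/preprocessor.py | ordoescape
-- ===== SOURCE A (Python) =====
-- def escape(input: str) -> str:
--     input = input.replace('<', r'\ensuremath{<}')
--     input = input.replace('>', r'\ensuremath{>}')
--     return input
--
-- def ordoescape(input: str, esc: bool = True) -> str:
--     if esc:
--         input = escape(input)
--     start = input.find("O(")
--     if start >= 0:
--         bracketcount = 1
--         end = start+1
--         while end+1<len(input) and bracketcount>0:
--             end = end + 1
--             if input[end] == '(':
--                 bracketcount = bracketcount + 1
--             elif input[end] == ')':
--                 bracketcount = bracketcount - 1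
--         if bracketcount == 0:
--             return rf"{input[:start]}\bigo{{{input[start+2:end]}}}{ordoescape(input[end+1:], False)}"
--     return input
-- ===== SOURCE B (Python) =====
-- def escape(input: str) -> str:
--     input = input.replace('<', r'\ensuremath{<}')
--     input = input.replace('>', r'\ensuremath{>}')
--     return input
--
-- def ordoescape(input: str, esc: bool = True) -> str:
--     # Single character-level pass with a depth state machine instead of
--     # find("O(") + bracket-counting loop + recursion on the suffix.
--     if esc:
--         input = escape(input)
--     out = []
--     pend = []
--     depth = 0
--     i = 0
--     n = len(input)
--     while i < n:
--         c = input[i]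
--         if depth == 0:
--             if c == 'O' and i + 1 < n and input[i + 1] == '(':
--                 depth = 1
--                 pend = []
--                 i += 2
--                 continue
--             out.append(c)
--         elif c == '(':
--             depth += 1
--             pend.append(c)
--         elif c == ')':
--             depth -= 1
--             if depth == 0:
--                 out.append('\\bigo{' + ''.join(pend) + '}')
--             else:
--                 pend.append(c)
--         else:
--             pend.append(c)
--         i += 1
--     if depth > 0:
--         out.append('O(' + ''.join(pend))
--     return ''.join(out)
-- ===== Notes on version B (the rewrite author's own statement) =====
-- stated objective: alternative
-- what changed: A repeatedly searches for the big-O opening marker, runs an index-based bracket-counting while loop and recurses on a sliced suffix; B makes one character-level pass with a depth state machine that copies characters at depth zero, accumulates and tracks nesting inside a big-O group, and flushes the pending text raw if the string ends before the group closes.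
import Mathlib
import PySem

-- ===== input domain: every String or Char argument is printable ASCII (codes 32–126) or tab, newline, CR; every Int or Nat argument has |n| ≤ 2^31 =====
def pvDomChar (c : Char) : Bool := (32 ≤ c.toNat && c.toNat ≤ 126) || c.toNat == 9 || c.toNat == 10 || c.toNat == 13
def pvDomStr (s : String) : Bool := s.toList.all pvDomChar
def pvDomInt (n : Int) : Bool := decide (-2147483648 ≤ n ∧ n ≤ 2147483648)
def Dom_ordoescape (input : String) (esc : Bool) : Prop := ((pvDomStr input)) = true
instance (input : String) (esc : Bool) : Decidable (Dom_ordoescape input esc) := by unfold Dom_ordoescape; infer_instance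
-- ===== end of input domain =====

-- B replaces A's find("O(") + index bracket-counting loop + recursion on the suffix by a single
-- character-level pass with a depth state machine (objective: alternative; same asymptotic cost).

-- ===== PORT A =====
-- escape: the module helper, shared verbatim by both Pythons
def escape (input : String) : String :=
  PySem.Str.replace (PySem.Str.replace input "<" "\\ensuremath{<}") ">" "\\ensuremath{>}"

-- A's while loop: `while end+1<len(input) and bracketcount>0: end += 1; …` returning (end, bracketcount).
-- input[end] is always in range (the loop condition guarantees e+1 < length), so getD is exact here.
def scanA (cs : List Char) (e : Nat) (bc : Int) : Nat × Int :=
  if e + 1 < cs.length ∧ 0 < bc then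
    let c := cs.getD (e + 1) ' '
    scanA cs (e + 1) (if c = '(' then bc + 1 else if c = ')' then bc - 1 else bc)
  else (e, bc)
termination_by cs.length - e

-- A's body after the optional escape, on the code points.  start = input.find("O("); slices with
-- nonnegative in-range Nat bounds are written as drop/take (= PySem.List.slice_natCast).
def coreA (cs : List Char) : List Char :=
  let start := PySem.Chars.find cs ['O', '(']
  if h : 0 ≤ start then
    let st := start.toNat
    let p := scanA cs (st + 1) 1
    if p.2 = 0 then
      cs.take st ++ "\\bigo{".toList ++ ((cs.drop (st + 2)).take (p.1 - (st + 2))) ++ "}".toList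
        ++ coreA (cs.drop (p.1 + 1))
    else cs
  else cs
termination_by cs.length
decreasing_by
  have h2 : ['O', '('] <:+: cs := (PySem.Chars.find_nonneg_iff cs ['O', '(']).mp h
  have := h2.length_le
  simp only [List.length_drop]
  simp at this
  omega

def ordoescape (input : String) (esc : Bool) : String :=
  let input := if esc then escape input else input
  String.ofList (coreA input.toList)

-- ===== PORT B =====
-- B's single pass: outsideB = depth 0 (copy chars, detect "O("), insideB = depth ≥ 1
-- (accumulate pend, track depth; flush "O(" ++ pend raw if the string ends unmatched).
mutual
def outsideB : List Char → List Char
  | [] => []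
  | c :: rest =>
    if c = 'O' ∧ rest.head? = some '(' then insideB rest.tail 1 []
    else c :: outsideB rest
termination_by cs => cs.length
decreasing_by all_goals simp [List.length_tail]
def insideB : List Char → Int → List Char → List Char
  | [], _, pend => "O(".toList ++ pend
  | c :: rest, depth, pend =>
    if c = '(' then insideB rest (depth + 1) (pend ++ [c])
    else if c = ')' then
      if depth = 1 then "\\bigo{".toList ++ pend ++ "}".toList ++ outsideB rest
      else insideB rest (depth - 1) (pend ++ [c])
    else insideB rest depth (pend ++ [c])
termination_by cs _ _ => cs.length
decreasing_by all_goals simp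
end

def ordoescape_alt (input : String) (esc : Bool) : String :=
  let input := if esc then escape input else input
  String.ofList (outsideB input.toList)

-- ===== PRECONDITION & SPEC =====
def Spec_ordoescape (input : String) (esc : Bool) (out : String) : Prop := out = ordoescape_alt input esc
instance (input : String) (esc : Bool) (out : String) : Decidable (Spec_ordoescape input esc out) := by unfold Spec_ordoescape; infer_instance

-- ===== CLAIM (what is proved, stated in full; the proofs are below) =====
def Claim_equal_ordoescape : Prop := ∀ (input : String) (esc : Bool), Dom_ordoescape input esc → Spec_ordoescape input esc (ordoescape input esc)

-- ===== LEMMAS AND PROOFS =====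

theorem scanA_fst_ge (cs : List Char) (e : Nat) (bc : Int) : e ≤ (scanA cs e bc).1 := by
  fun_induction scanA with
  | case1 e bc h c ih => exact le_trans (Nat.le_succ e) ih
  | case2 e bc h => simp
theorem scanA_closed_gt (cs : List Char) (e : Nat) (bc : Int) (hbc : 0 < bc)
    (h : (scanA cs e bc).2 = 0) : e + 1 ≤ (scanA cs e bc).1 := by
  rw [scanA] at h ⊢
  by_cases hc : e + 1 < cs.length ∧ 0 < bc
  · simp only [if_pos hc]; exact scanA_fst_ge _ _ _
  · simp [if_neg hc] at h; omega

theorem bridge (n : Nat) (cs : List Char) (e : Nat) (d : Int) (pend : List Char)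
    (hn : cs.length ≤ e + n) (hd : 1 ≤ d) :
    insideB (cs.drop (e + 1)) d pend =
      if (scanA cs e d).2 = 0 then
        "\\bigo{".toList ++ (pend ++ (cs.drop (e + 1)).take ((scanA cs e d).1 - (e + 1)))
          ++ "}".toList ++ outsideB (cs.drop ((scanA cs e d).1 + 1))
      else "O(".toList ++ (pend ++ cs.drop (e + 1)) := by
  induction n generalizing e d pend with
  | zero =>
    have hnil : cs.drop (e + 1) = [] := List.drop_eq_nil_of_le (by omega)
    have hstop : scanA cs e d = (e, d) := by
      rw [scanA, if_neg (show ¬(e + 1 < cs.length ∧ 0 < d) by omega)]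
    have hne : ¬((e, d).2 = 0) := by simp; omega
    rw [hstop, hnil, if_neg hne]
    simp [insideB]
  | succ n ih =>
    by_cases hlen : e + 1 < cs.length
    · have hdrop : cs.drop (e + 1) = cs[e + 1] :: cs.drop (e + 1 + 1) := List.drop_eq_getElem_cons hlen
      have hgetD : cs.getD (e + 1) ' ' = cs[e + 1] := List.getD_eq_getElem cs ' ' hlen
      have hscan : scanA cs e d = scanA cs (e + 1)
          (if cs[e + 1] = '(' then d + 1 else if cs[e + 1] = ')' then d - 1 else d) := by
        rw [scanA, if_pos ⟨hlen, by omega⟩, hgetD]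
      rw [hdrop, hscan]
      by_cases hc1 : cs[e + 1] = '('
      · rw [if_pos hc1]
        have := ih (e + 1) (d + 1) (pend ++ [cs[e + 1]]) (by omega) (by omega)
        rw [insideB, if_pos hc1, this]
        by_cases h0 : (scanA cs (e + 1) (d + 1)).2 = 0
        · have hE := scanA_closed_gt cs (e + 1) (d + 1) (by omega) h0
          rw [if_pos h0, if_pos h0]
          have htake : (cs[e + 1] :: cs.drop (e + 1 + 1)).take ((scanA cs (e + 1) (d + 1)).1 - (e + 1))
              = cs[e + 1] :: (cs.drop (e + 1 + 1)).take ((scanA cs (e + 1) (d + 1)).1 - (e + 1 + 1)) := by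
            have : (scanA cs (e + 1) (d + 1)).1 - (e + 1) = ((scanA cs (e + 1) (d + 1)).1 - (e + 1 + 1)) + 1 := by omega
            rw [this, List.take_succ_cons]
          rw [htake]; simp
        · rw [if_neg h0, if_neg h0]; simp
      · by_cases hc2 : cs[e + 1] = ')'
        · rw [if_neg hc1, if_pos hc2]
          by_cases hd1 : d = 1
          · subst hd1
            rw [insideB, if_neg hc1, if_pos hc2, if_pos rfl]
            have hstop : scanA cs (e + 1) (1 - 1) = (e + 1, 0) := by
              rw [scanA, if_neg (by omega)]; norm_num
            norm_num at hstop ⊢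
            rw [hstop]
            simp
          · rw [insideB, if_neg hc1, if_pos hc2, if_neg hd1]
            have := ih (e + 1) (d - 1) (pend ++ [cs[e + 1]]) (by omega) (by omega)
            rw [this]
            by_cases h0 : (scanA cs (e + 1) (d - 1)).2 = 0
            · have hE := scanA_closed_gt cs (e + 1) (d - 1) (by omega) h0
              rw [if_pos h0, if_pos h0]
              have htake : (cs[e + 1] :: cs.drop (e + 1 + 1)).take ((scanA cs (e + 1) (d - 1)).1 - (e + 1))
                  = cs[e + 1] :: (cs.drop (e + 1 + 1)).take ((scanA cs (e + 1) (d - 1)).1 - (e + 1 + 1)) := by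
                have : (scanA cs (e + 1) (d - 1)).1 - (e + 1) = ((scanA cs (e + 1) (d - 1)).1 - (e + 1 + 1)) + 1 := by omega
                rw [this, List.take_succ_cons]
              rw [htake]; simp
            · rw [if_neg h0, if_neg h0]; simp
        · rw [if_neg hc1, if_neg hc2]
          rw [insideB, if_neg hc1, if_neg hc2]
          have := ih (e + 1) d (pend ++ [cs[e + 1]]) (by omega) hd
          rw [this]
          by_cases h0 : (scanA cs (e + 1) d).2 = 0
          · have hE := scanA_closed_gt cs (e + 1) d (by omega) h0
            rw [if_pos h0, if_pos h0]
            have htake : (cs[e + 1] :: cs.drop (e + 1 + 1)).take ((scanA cs (e + 1) d).1 - (e + 1))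
                = cs[e + 1] :: (cs.drop (e + 1 + 1)).take ((scanA cs (e + 1) d).1 - (e + 1 + 1)) := by
              have : (scanA cs (e + 1) d).1 - (e + 1) = ((scanA cs (e + 1) d).1 - (e + 1 + 1)) + 1 := by omega
              rw [this, List.take_succ_cons]
            rw [htake]; simp
          · rw [if_neg h0, if_neg h0]; simp
    · have hnil : cs.drop (e + 1) = [] := List.drop_eq_nil_of_le (by omega)
      have hstop : scanA cs e d = (e, d) := by
        rw [scanA, if_neg (show ¬(e + 1 < cs.length ∧ 0 < d) by omega)]
      have hne : ¬((e, d).2 = 0) := by simp; omega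
      rw [hstop, hnil, if_neg hne]
      simp [insideB]

theorem patP (c : Char) (rest : List Char) :
    (c = 'O' ∧ rest.head? = some '(') ↔ ['O', '('] <+: (c :: rest) := by
  cases rest with
  | nil => simp [List.cons_prefix_cons]
  | cons d t => simp [List.cons_prefix_cons]; constructor <;> (rintro ⟨h1, h2⟩; exact ⟨h1.symm, h2.symm⟩)

theorem noOcc (cs : List Char) (h : ¬ ['O', '('] <:+: cs) : outsideB cs = cs := by
  induction cs with
  | nil => simp [outsideB]
  | cons c rest ih =>
    rw [outsideB, if_neg (fun hc => h ((patP c rest).mp hc).isInfix)]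
    rw [ih (fun hi => h (hi.trans (List.suffix_cons c rest).isInfix))]

theorem skip (cs : List Char) (k : Nat)
    (hmin : ∀ i < k, ¬ ['O', '('] <+: cs.drop i) (hk : ['O', '('] <+: cs.drop k) :
    outsideB cs = cs.take k ++ insideB (cs.drop (k + 2)) 1 [] := by
  induction cs generalizing k with
  | nil => simp at hk
  | cons c rest ih =>
    cases k with
    | zero =>
      simp only [List.drop_zero] at hk
      rw [outsideB, if_pos ((patP c rest).mpr hk)]
      simp [List.drop_one]
    | succ k =>
      have h0 : ¬ (c = 'O' ∧ rest.head? = some '(') := by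
        intro hc
        exact hmin 0 (by omega) (by simpa using (patP c rest).mp hc)
      rw [outsideB, if_neg h0]
      have hmin' : ∀ i < k, ¬ ['O', '('] <+: rest.drop i := by
        intro i hi
        simpa using hmin (i + 1) (by omega)
      rw [ih k hmin' (by simpa using hk)]
      simp [List.take_succ_cons]

theorem main_aux (n : Nat) : ∀ cs : List Char, cs.length ≤ n → outsideB cs = coreA cs := by
  induction n with
  | zero =>
    intro cs hlen
    have : cs = [] := List.eq_nil_of_length_eq_zero (by omega)
    subst this
    rw [coreA, dif_neg (by decide)]
    simp [outsideB]
  | succ n ih =>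
    intro cs hlen
    by_cases hf : 0 ≤ PySem.Chars.find cs ['O', '(']
    · have hspec := PySem.Chars.find_spec hf
      have hinf : ['O', '('] <:+: cs := (PySem.Chars.find_nonneg_iff cs ['O', '(']).mp hf
      have hlen2 : 2 ≤ cs.length := by simpa using hinf.length_le
      have hskip := skip cs (PySem.Chars.find cs ['O', '(']).toNat hspec.2 hspec.1
      have hbr := bridge cs.length cs ((PySem.Chars.find cs ['O', '(']).toNat + 1) 1 []
        (by omega) le_rfl
      rw [show (PySem.Chars.find cs ['O', '(']).toNat + 1 + 1
            = (PySem.Chars.find cs ['O', '(']).toNat + 2 from rfl] at hbr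
      rw [hskip, hbr]
      rw [coreA]
      simp only [dif_pos hf]
      by_cases h0 : (scanA cs ((PySem.Chars.find cs ['O', '(']).toNat + 1) 1).2 = 0
      · rw [if_pos h0, if_pos h0]
        have hge := scanA_fst_ge cs ((PySem.Chars.find cs ['O', '(']).toNat + 1) 1
        rw [ih (cs.drop ((scanA cs ((PySem.Chars.find cs ['O', '(']).toNat + 1) 1).1 + 1))
            (by simp; omega)]
        simp
      · rw [if_neg h0, if_neg h0]
        obtain ⟨t, ht⟩ := hspec.1
        have hdrop2 : cs.drop ((PySem.Chars.find cs ['O', '(']).toNat + 2) = t := by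
          have := congrArg (List.drop 2) ht
          simpa [List.drop_drop] using this.symm
        rw [hdrop2]
        conv_rhs => rw [← List.take_append_drop (PySem.Chars.find cs ['O', '(']).toNat cs, ← ht]
        simp
    · rw [coreA]
      simp only [dif_neg hf]
      exact noOcc cs (fun hi => hf ((PySem.Chars.find_nonneg_iff cs ['O', '(']).mpr hi))

theorem main_eq (cs : List Char) : outsideB cs = coreA cs := main_aux cs.length cs le_rfl

-- ===== VERDICT (by name: the statement is the Claim_ definition above) =====
theorem ordoescape_spec : Claim_equal_ordoescape := by
  intro input esc _
  unfold Spec_ordoescape ordoescape ordoescape_alt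
  simp [main_eq]
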